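-- pv_equiv track=rewrite | github.com/maciek3000/GnuCash-Expenses-Vis | flask_app/bkapp/pandas_functions.py | create_combinations_of_sep_values
-- ===== SOURCE A (Python) =====
-- from itertools import accumulate
--
-- def create_combinations_of_sep_values(list_of_values, sep=None):
--     new_set = set()
--
--     for val in list_of_values:
--         if sep is None:
--             new_set.add(val)
--         else:
--             elem_list = val.split(sep)
--             elems = accumulate(elem_list, func=lambda x, y: sep.join([x, y]))
--             for item in elems:
--                 new_set.add(item)
--
--     new_list = list(new_set)
--     new_list.sort()
--     return new_list
-- ===== SOURCE B (Python) =====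
-- def create_combinations_of_sep_values(list_of_values, sep=None):
--     result = set()
--     for val in list_of_values:
--         if sep is None:
--             result.add(val)
--         else:
--             if sep == "":
--                 raise ValueError("empty separator")
--             i, n, m = 0, len(val), len(sep)
--             while i + m <= n:
--                 if val[i:i + m] == sep:
--                     result.add(val[:i])
--                     i += m
--                 else:
--                     i += 1
--             result.add(val)
--     return sorted(result)
-- ===== Notes on version B (the rewrite author's own statement) =====
-- stated objective: alternative
-- what changed: B collects each cumulative prefix directly in one non-overlapping scan for the separator over the raw string, instead of splitting into a token list and re-joining cumulative token runs with itertools.accumulate; Pre_ excludes sep == '' with a non-empty list, where A's str.split raises ValueError (B raises too; with no values neither raises, and such inputs stay inside Pre_).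
import Mathlib
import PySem

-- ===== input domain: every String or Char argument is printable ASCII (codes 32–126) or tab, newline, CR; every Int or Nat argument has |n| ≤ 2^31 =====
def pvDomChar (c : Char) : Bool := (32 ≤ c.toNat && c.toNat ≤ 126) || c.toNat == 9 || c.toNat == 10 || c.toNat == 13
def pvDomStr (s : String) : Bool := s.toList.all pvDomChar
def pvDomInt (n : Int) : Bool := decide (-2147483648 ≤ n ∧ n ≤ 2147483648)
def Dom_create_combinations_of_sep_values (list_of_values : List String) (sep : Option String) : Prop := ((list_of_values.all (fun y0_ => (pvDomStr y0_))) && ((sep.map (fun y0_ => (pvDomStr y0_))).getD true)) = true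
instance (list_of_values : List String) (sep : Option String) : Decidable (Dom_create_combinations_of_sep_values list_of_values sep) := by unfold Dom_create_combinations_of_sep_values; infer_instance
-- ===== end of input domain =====

-- B collects each cumulative prefix directly by a single non-overlapping scan for the
-- separator instead of splitting into tokens and re-joining cumulative runs (alternative
-- decomposition, same cost).

-- ===== PORT A =====
-- accumulate(elem_list, func=lambda x, y: sep.join([x, y])) on a non-empty token list:
-- first value is the head, each next value joins the running value with the next token.
def pvAccJoin (sep : List Char) (cur : List Char) : List (List Char) → List (List Char)
  | [] => [cur]
  | y :: ys => cur :: pvAccJoin sep (PySem.Chars.join sep [cur, y]) ys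

def create_combinations_of_sep_values (list_of_values : List String) (sep : Option String) : List String :=
  let new_set : PySem.Set String :=
    list_of_values.foldl (fun new_set val =>
      match sep with
      | none => PySem.Set.add new_set val
      | some sp =>
        -- val.split(sep): total form Chars.splitOn, exact for sep ≠ "" (Pre_ excludes sep = "")
        let elem_list := PySem.Chars.splitOn val.toList sp.toList
        let elems := match elem_list with
          | [] => []
          | t :: ts => pvAccJoin sp.toList t ts
        elems.foldl (fun s item => PySem.Set.add s (String.ofList item)) new_set)
      PySem.Set.empty
  PySem.List.sorted new_set (fun x => x) false

-- ===== PORT B =====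
-- B's while loop over i with i+m<=n; state kept as (pre, l) = (val[:i], val[i:]), fuel = n+1
-- (enough iterations for m ≥ 1; the fuel only makes the loop total for the excluded sep = "").
def pvScanP (sep : List Char) : Nat → List Char → List Char → List (List Char)
  | 0, pre, l => [pre ++ l]
  | fuel + 1, pre, l =>
    if sep.length ≤ l.length then
      if sep.isPrefixOf l then
        pre :: pvScanP sep fuel (pre ++ sep) (l.drop sep.length)
      else
        match l with
        | [] => [pre]
        | c :: rest => pvScanP sep fuel (pre ++ [c]) rest
    else [pre ++ l]

def create_combinations_of_sep_values_alt (list_of_values : List String) (sep : Option String) : List String :=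
  let result : PySem.Set String :=
    list_of_values.foldl (fun result val =>
      match sep with
      | none => PySem.Set.add result val
      | some sp =>
        (pvScanP sp.toList (val.toList.length + 1) [] val.toList).foldl
          (fun s p => PySem.Set.add s (String.ofList p)) result)
      PySem.Set.empty
  PySem.List.sorted result (fun x => x) false

-- ===== PRECONDITION & SPEC =====
-- Pre_ excludes only sep = some "" with a non-empty value list: there A's val.split(sep)
-- raises ValueError (B raises too); with no values split never runs and both return normally.
def Pre_create_combinations_of_sep_values (list_of_values : List String) (sep : Option String) : Prop :=
  sep ≠ some "" ∨ list_of_values = []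
instance (list_of_values : List String) (sep : Option String) : Decidable (Pre_create_combinations_of_sep_values list_of_values sep) := by unfold Pre_create_combinations_of_sep_values; infer_instance

def pvWitness_create_combinations_of_sep_values : List String × Option String := (["a,b", "c"], some ",")

def Spec_create_combinations_of_sep_values (list_of_values : List String) (sep : Option String) (out : List String) : Prop := out = create_combinations_of_sep_values_alt list_of_values sep
instance (list_of_values : List String) (sep : Option String) (out : List String) : Decidable (Spec_create_combinations_of_sep_values list_of_values sep out) := by unfold Spec_create_combinations_of_sep_values; infer_instance

-- ===== CLAIM (what is proved, stated in full; the proofs are below) =====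
def Claim_equal_create_combinations_of_sep_values : Prop := ∀ (list_of_values : List String) (sep : Option String), Dom_create_combinations_of_sep_values list_of_values sep → Pre_create_combinations_of_sep_values list_of_values sep → Spec_create_combinations_of_sep_values list_of_values sep (create_combinations_of_sep_values list_of_values sep)

-- ===== LEMMAS AND PROOFS =====

-- clean reformulation of PySem.Chars.splitOn.go (tokens, head-first)
def pvToks (sep : List Char) : Nat → List Char → List Char → List (List Char)
  | 0, cur, l => [cur ++ l]
  | fuel + 1, cur, l =>
    match l with
    | [] => [cur]
    | c :: rest =>
      if sep.isPrefixOf l then cur :: pvToks sep fuel [] (l.drop sep.length)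
      else pvToks sep fuel (cur ++ [c]) rest

theorem pvGo_eq_toks (sep : List Char) (fuel : Nat) :
    ∀ (l cur : List Char) (accs : List (List Char)),
      PySem.Chars.splitOn.go sep fuel l cur accs = accs.reverse ++ pvToks sep fuel cur.reverse l := by
  induction fuel with
  | zero =>
    intro l cur accs
    simp [PySem.Chars.splitOn.go, pvToks]
  | succ fuel ih =>
    intro l cur accs
    cases l with
    | nil => simp [PySem.Chars.splitOn.go, pvToks]
    | cons c rest =>
      by_cases h : sep.isPrefixOf (c :: rest)
      · simp only [PySem.Chars.splitOn.go, h, if_true]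
        rw [ih]
        simp [pvToks, h]
      · rw [show PySem.Chars.splitOn.go sep (fuel+1) (c::rest) cur accs
              = PySem.Chars.splitOn.go sep fuel rest (c::cur) accs from by
            simp [PySem.Chars.splitOn.go, h]]
        rw [ih, List.reverse_cons]
        simp [pvToks, h]

theorem pvToks_ne_nil (sep : List Char) (fuel : Nat) (cur l : List Char) :
    pvToks sep fuel cur l ≠ [] := by
  cases fuel with
  | zero => simp [pvToks]
  | succ fuel =>
    cases l with
    | nil => simp [pvToks]
    | cons c rest =>
      by_cases h : sep.isPrefixOf (c :: rest) <;>
        simp [pvToks, h, pvToks_ne_nil sep fuel]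

-- tokens of a too-short remainder: no further split happens
theorem pvToks_short (sep : List Char) (fuel : Nat) :
    ∀ (cur l : List Char), l.length < sep.length → pvToks sep fuel cur l = [cur ++ l] := by
  induction fuel with
  | zero => intro cur l _; simp [pvToks]
  | succ fuel ih =>
    intro cur l h
    cases l with
    | nil =>
      simp [pvToks]
    | cons c rest =>
      have hnp : ¬ sep.isPrefixOf (c :: rest) := by
        intro hp
        have := (List.isPrefixOf_iff_prefix.mp hp).length_le
        omega
      simp only [pvToks, hnp]
      rw [ih (cur ++ [c]) rest (by simp at h ⊢; omega)]
      simp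

-- accumulate-prefixes of the token list, with P = text already consumed before the current token
def pvAccP (sep : List Char) : List Char → List (List Char) → List (List Char)
  | P, [] => [P]
  | P, [t] => [P ++ t]
  | P, t :: t' :: ts => (P ++ t) :: pvAccP sep (P ++ t ++ sep) (t' :: ts)

-- the scan produces exactly the accumulate-prefixes of the tokens
theorem pvScanP_eq_accP (sep : List Char) (hsep : sep ≠ []) (fuel : Nat) :
    ∀ (l P cur : List Char),
      pvScanP sep fuel (P ++ cur) l = pvAccP sep P (pvToks sep fuel cur l) := by
  induction fuel with
  | zero =>
    intro l P cur
    simp [pvScanP, pvToks, pvAccP]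
  | succ fuel ih =>
    intro l P cur
    cases l with
    | nil =>
      simp [pvScanP, pvToks, pvAccP, hsep]
    | cons c rest =>
      by_cases hp : sep.isPrefixOf (c :: rest)
      · have hlen : sep.length ≤ (c :: rest).length :=
          (List.isPrefixOf_iff_prefix.mp hp).length_le
        simp only [pvScanP, pvToks, hlen, if_true, hp]
        have := ih ((c :: rest).drop sep.length) (P ++ cur ++ sep) []
        simp only [List.append_nil] at this
        rw [this]
        rcases h0 : pvToks sep fuel [] ((c :: rest).drop sep.length) with _ | ⟨t, ts⟩
        · exact absurd h0 (pvToks_ne_nil sep fuel [] _)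
        · cases ts <;> simp [pvAccP, List.append_assoc]
      · by_cases hlen : sep.length ≤ (c :: rest).length
        · simp only [pvScanP, pvToks, hlen, if_true, hp]
          have := ih rest P (cur ++ [c])
          rw [← List.append_assoc] at this
          exact this
        · simp only [pvScanP, pvToks, hlen, if_false, hp]
          rw [pvToks_short sep fuel (cur ++ [c]) rest (by simp at hlen ⊢; omega)]
          simp [pvAccP, List.append_assoc]

-- A's accumulate over tokens equals the accumulate-prefixes form
theorem pvAccJoin_eq_accP (sep : List Char) :
    ∀ (ts : List (List Char)) (P t : List Char),
      pvAccJoin sep (P ++ t) ts = pvAccP sep P (t :: ts) := by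
  intro ts
  induction ts with
  | nil => intro P t; simp [pvAccJoin, pvAccP]
  | cons y ys ih =>
    intro P t
    simp only [pvAccJoin, pvAccP]
    have : PySem.Chars.join sep [P ++ t, y] = (P ++ t ++ sep) ++ y := by
      simp [PySem.Chars.join, List.intercalate]
    rw [this, ih (P ++ t ++ sep) y]

-- per-value: A's elems list = B's scan list (sep ≠ "")
theorem pvPerVal (sp : String) (hsp : sp ≠ "") (val : String) :
    (match PySem.Chars.splitOn val.toList sp.toList with
      | [] => []
      | t :: ts => pvAccJoin sp.toList t ts)
    = pvScanP sp.toList (val.toList.length + 1) [] val.toList := by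
  have hsep : sp.toList ≠ [] := by
    intro h
    exact hsp (by simpa using congrArg String.ofList h)
  have hs : PySem.Chars.splitOn val.toList sp.toList
      = pvToks sp.toList (val.toList.length + 1) [] val.toList := by
    unfold PySem.Chars.splitOn
    rw [pvGo_eq_toks sp.toList (val.toList.length + 1) val.toList [] []]
    simp
  rw [hs]
  have hscan := pvScanP_eq_accP sp.toList hsep (val.toList.length + 1) val.toList [] []
  simp only [List.append_nil] at hscan
  rw [hscan]
  rcases h0 : pvToks sp.toList (val.toList.length + 1) [] val.toList with _ | ⟨t, ts⟩
  · exact absurd h0 (pvToks_ne_nil _ _ _ _)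
  · have := pvAccJoin_eq_accP sp.toList ts [] t
    simp only [List.nil_append] at this
    exact this

-- ===== VERDICT (by name: the statement is the Claim_ definition above) =====
theorem create_combinations_of_sep_values_spec : Claim_equal_create_combinations_of_sep_values := by
  intro lov sep _ hpre
  unfold Spec_create_combinations_of_sep_values
  cases sep with
  | none => rfl
  | some sp =>
    by_cases hsp : sp = ""
    · rcases hpre with h | h
      · exact absurd (by rw [hsp]) h
      · subst h; rfl
    · unfold create_combinations_of_sep_values create_combinations_of_sep_values_alt
      simp only
      congr 1
      have hf : (fun (new_set : PySem.Set String) (val : String) =>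
          (match PySem.Chars.splitOn val.toList sp.toList with
            | [] => []
            | t :: ts => pvAccJoin sp.toList t ts).foldl
              (fun s item => PySem.Set.add s (String.ofList item)) new_set)
          = (fun (result : PySem.Set String) (val : String) =>
          (pvScanP sp.toList (val.toList.length + 1) [] val.toList).foldl
              (fun s p => PySem.Set.add s (String.ofList p)) result) := by
        funext s val
        rw [pvPerVal sp hsp val]
      rw [hf]
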